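-- pv_equiv track=rewrite | github.com/eld120/leetcode | ud_wordplay/bigger_wordplay_questions/find_alphabet_chains.py | longest_alphabet_chain_in_word
-- ===== SOURCE A (Python) =====
-- def longest_alphabet_chain_in_word(input_string: str):
--     '''
--     given a string of uknown length eg 'FEEDBACK'
--
--     -> FOODBUCK
--
--
--     sorted word - 'ABCDEEFK' - needs to be compared to the alphabet 'ABCDEFG'
--     also consider removing duplicates (perhaps turn the sorted word into a set)
--
--     - need to define the start/end of the alphabet chain:
--     base case is first letter in sorted word == beginning of the alphabet
--         - find out where I need to start in the alphabet via a dictionary (key=letter, value=index in the alphabet)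
--         - if the first sorted letter in my word is C : we'd immediately know where to start looking in the alphabet
--         - iterate through the letters in the sorted word, use dict lookup (or compare incrementing slice of word with slice of alphabet)
--
--
--
--     TURQUOISED
--     ['D', 'E', 'I', 'O', 'Q', 'R', 'S', 'T', 'U', 'U']
--     need a variable to track the longest alphabet chain
--     DE currently longest alphabet chain
--     QRS currently longest alphabet chain
--     QRST
--     QRSTU is the longest alphabet
--
--     tracking the longest alphabet chain
--     alphabet_chain_start and alphabet_chain_end pointers
--     current_alphabet_chain
--
--
--     FEEDBACK
--     sorted(set(FEEDBACK))
--     ['A', 'B', 'C', 'D', 'E', 'F', 'K']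
--     A
--     AB
--     ABC
--     ABCD
--     ABCDEF
--     '''
--
--     longest_alphabet_chain = []
--     current_alphabet_chain = []
--     #breakpoint()
--     # ['D', 'E', 'I', 'O', 'Q', 'R', 'S', 'T', 'U', 'U']
--     for char in sorted(set(input_string)):
--
--         if not current_alphabet_chain:
--             current_alphabet_chain.append(char)
--         elif ord(current_alphabet_chain[-1]) + 1 == ord(char):
--             current_alphabet_chain.append(char)
--         else:
--             if len(current_alphabet_chain) > len(longest_alphabet_chain):
--                 longest_alphabet_chain = current_alphabet_chain
--             current_alphabet_chain = [char]
--     if len(current_alphabet_chain) > len(longest_alphabet_chain):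
--         longest_alphabet_chain = current_alphabet_chain
--     return longest_alphabet_chain
-- ===== SOURCE B (Python) =====
-- def longest_alphabet_chain_in_word(input_string: str):
--     # Hash-set chain expansion (LeetCode-128 style): no sorting, no run lists.
--     chars = set(input_string)
--     best_start, best_len = None, 0
--     for c in chars:
--         if chr(ord(c) - 1) in chars:
--             continue  # c is not the start of a chain
--         length = 1
--         while chr(ord(c) + length) in chars:
--             length += 1
--         if length > best_len or (length == best_len and best_start is not None and c < best_start):
--             best_start, best_len = c, length
--     return [chr(ord(best_start) + i) for i in range(best_len)] if best_start is not None else []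
-- ===== Notes on version B (the rewrite author's own statement) =====
-- stated objective: alternative
-- what changed: Replaces A's sort-then-scan run accumulator with the hash-set chain-expansion algorithm (LeetCode 128): build a set of the letters, for each letter whose predecessor is absent walk successive letters through the set to get the chain length, keep the best (longest, then smallest start), and reconstruct the chain arithmetically from its start; no sorting and no run lists.
import Mathlib
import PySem

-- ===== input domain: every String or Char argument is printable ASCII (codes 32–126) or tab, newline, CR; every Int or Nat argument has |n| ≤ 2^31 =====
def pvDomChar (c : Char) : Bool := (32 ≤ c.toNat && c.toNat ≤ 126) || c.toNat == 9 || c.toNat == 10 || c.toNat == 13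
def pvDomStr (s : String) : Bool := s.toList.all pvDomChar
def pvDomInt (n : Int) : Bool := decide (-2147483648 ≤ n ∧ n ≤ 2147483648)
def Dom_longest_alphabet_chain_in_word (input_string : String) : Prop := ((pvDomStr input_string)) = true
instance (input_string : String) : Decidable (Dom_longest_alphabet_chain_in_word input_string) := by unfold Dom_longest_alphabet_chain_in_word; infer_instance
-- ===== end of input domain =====

-- B replaces A's sort-then-scan run accumulator by the hash-set chain-expansion algorithm
-- (for each letter whose predecessor is absent from the set, walk successors through the set);
-- an alternative algorithm of similar cost; return values proved equal.


-- ===== PORT A =====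
-- one iteration of A's loop over sorted(set(input_string)): state = (longest_alphabet_chain, current_alphabet_chain)
def lacStepA : List Char × List Char → Char → List Char × List Char
  | (longest, current), char =>
    if current = [] then (longest, current ++ [char])
    else if (current.getLastD 'a').toNat + 1 = char.toNat then (longest, current ++ [char])
    else if longest.length < current.length then (current, [char])
    else (longest, [char])

-- A's trailing `if len(current) > len(longest): longest = current; return longest`
def lacFinishA (st : List Char × List Char) : List Char :=
  if st.1.length < st.2.length then st.2 else st.1

def longest_alphabet_chain_in_word (input_string : String) : List String :=
  (lacFinishA ((PySem.List.sorted (PySem.Set.ofList input_string.toList) (fun c => c) false).foldl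
      lacStepA ([], []))).map (fun c => String.ofList [c])   -- Python's list of 1-char strings

-- ===== PORT B =====
-- `chr(ord(c) ± k) in chars`: membership of the character with that code (exact on Dom:
-- codes are ≥ 9, chars and codes are in bijection there)
def lacMemCode (chars : List Char) (n : Nat) : Bool := chars.any (fun d => d.toNat = n)

-- `while chr(ord(c) + length) in chars: length += 1`; fuel = |chars| bounds the loop
-- exactly (a chain has at most |chars| letters), so the fuel guard only makes it total
def lacExpand (chars : List Char) (base : Nat) : Nat → Nat → Nat
  | 0, len => len
  | fuel + 1, len => if lacMemCode chars (base + len) then lacExpand chars base fuel (len + 1) else len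

-- `length > best_len or (length == best_len and best_start is not None and c < best_start)`
def lacBetter (st : Option Char × Nat) (c : Char) (len : Nat) : Bool :=
  decide (st.2 < len) ||
    (decide (len = st.2) && (match st.1 with | none => false | some b => decide (c.toNat < b.toNat)))

-- one iteration of B's loop over the set of letters (the result is order-independent,
-- matching Python's unspecified set-iteration order; proved below via commutativity)
def lacPick (chars : List Char) (st : Option Char × Nat) (c : Char) : Option Char × Nat :=
  if lacMemCode chars (c.toNat - 1) then st
  else
    let len := lacExpand chars c.toNat chars.length 1
    if lacBetter st c len then (some c, len) else st

def longest_alphabet_chain_in_word_alt (input_string : String) : List String :=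
  let chars := PySem.Set.ofList input_string.toList
  let st := chars.foldl (lacPick chars) (none, 0)
  match st.1 with
  | none => []
  | some s => (List.range st.2).map (fun i => String.ofList [Char.ofNat (s.toNat + i)])

-- ===== PRECONDITION & SPEC =====
def Spec_longest_alphabet_chain_in_word (input_string : String) (out : List String) : Prop := out = longest_alphabet_chain_in_word_alt input_string
instance (input_string : String) (out : List String) : Decidable (Spec_longest_alphabet_chain_in_word input_string out) := by unfold Spec_longest_alphabet_chain_in_word; infer_instance

-- ===== CLAIM (what is proved, stated in full; the proofs are below) =====
def Claim_equal_longest_alphabet_chain_in_word : Prop := ∀ (input_string : String), Dom_longest_alphabet_chain_in_word input_string → Spec_longest_alphabet_chain_in_word input_string (longest_alphabet_chain_in_word input_string)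

-- ===== LEMMAS AND PROOFS =====
-- A's "keep the longer, first wins ties" as a fold step
def mstep (b r : List Char) : List Char := if b.length < r.length then r else b

-- split off the consecutive continuation of code e
def contRun : Nat → List Char → List Char × List Char
  | _, [] => ([], [])
  | e, d :: ds =>
      if d.toNat = e + 1 then ((contRun d.toNat ds).1.cons d, (contRun d.toNat ds).2)
      else ([], d :: ds)

theorem contRun_append : ∀ (cs : List Char) (e : Nat), (contRun e cs).1 ++ (contRun e cs).2 = cs := by
  intro cs
  induction cs with
  | nil => intro e; rfl
  | cons d ds ih =>
    intro e
    by_cases h : d.toNat = e + 1 <;> simp [contRun, h, ih]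

theorem contRun_rest_len : ∀ (cs : List Char) (e : Nat), (contRun e cs).2.length ≤ cs.length := by
  intro cs
  induction cs with
  | nil => intro e; simp [contRun]
  | cons d ds ih =>
    intro e
    by_cases h : d.toNat = e + 1
    · have hh := ih d.toNat
      rw [h] at hh
      simp only [contRun, h, if_pos rfl, List.length_cons]
      exact Nat.le_succ_of_le hh
    · simp [contRun, h]

theorem contRun_codes : ∀ (cs : List Char) (e : Nat),
    ((contRun e cs).1).map Char.toNat = List.range' (e + 1) (contRun e cs).1.length := by
  intro cs
  induction cs with
  | nil => intro e; rfl
  | cons d ds ih =>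
    intro e
    by_cases h : d.toNat = e + 1
    · have hh := ih d.toNat
      rw [h] at hh
      simp only [contRun, h, if_pos rfl, List.cons_eq_cons, List.map_cons, List.length_cons,
        hh, List.cons.injEq]
      simp [List.range'_succ, h, hh]
    · simp [contRun, h]

theorem contRun_rest_gt : ∀ (cs : List Char) (e : Nat),
    cs.Pairwise (fun a b => a.toNat < b.toNat) → (∀ d ∈ cs, e < d.toNat) →
    ∀ d ∈ (contRun e cs).2, e + (contRun e cs).1.length + 2 ≤ d.toNat := by
  intro cs
  induction cs with
  | nil => intro e _ _ d hd; simp [contRun] at hd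
  | cons d ds ih =>
    intro e hp hgt x hx
    rcases List.pairwise_cons.mp hp with ⟨hhd, htl⟩
    by_cases h : d.toNat = e + 1
    · have hih := ih d.toNat htl hhd
      rw [h] at hih
      simp [contRun, h] at hx ⊢
      have hv := hih x hx
      omega
    · simp [contRun, h] at hx ⊢
      rcases hx with rfl | hx
      · have := hgt x (by simp); omega
      · have h1 := hgt d (by simp)
        have h2 := hhd x hx
        omega

-- the run decomposition of a strictly increasing character list
def runsRec : List Char → List (List Char)
  | [] => []
  | c :: cs => (c :: (contRun c.toNat cs).1) :: runsRec (contRun c.toNat cs).2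
  termination_by M => M.length
  decreasing_by simpa using Nat.lt_succ_of_le (contRun_rest_len cs c.toNat)

-- ---- A-side: A's fold computes the first longest run ----
theorem keyA : ∀ (M : List Char) (e : Nat) (lg cur : List Char), cur ≠ [] →
    (cur.getLastD 'a').toNat = e →
    lacFinishA (M.foldl lacStepA (lg, cur)) =
      (runsRec (contRun e M).2).foldl mstep (mstep lg (cur ++ (contRun e M).1)) := by
  intro M
  induction M with
  | nil => intro e lg cur _ _; simp [contRun, runsRec, lacFinishA, mstep]
  | cons d ds ih =>
    intro e lg cur hne hlast
    by_cases h : d.toNat = e + 1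
    · have hcond : (cur.getLastD 'a').toNat + 1 = d.toNat := by rw [hlast]; omega
      have step : lacStepA (lg, cur) d = (lg, cur ++ [d]) := by
        simp only [lacStepA]
        rw [if_neg hne, if_pos hcond]
      simp only [List.foldl_cons, step]
      have ih' := ih d.toNat lg (cur ++ [d]) (by simp) (by simp [List.getLastD_concat])
      rw [ih']
      have hc : contRun e (d :: ds) = (d :: (contRun d.toNat ds).1, (contRun d.toNat ds).2) := by
        simp [contRun, h]
      rw [hc]
      simp
    · have h2 : ¬ ((cur.getLastD 'a').toNat + 1 = d.toNat) := by rw [hlast]; omega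
      have step : lacStepA (lg, cur) d = (mstep lg cur, [d]) := by
        simp only [lacStepA]
        rw [if_neg hne, if_neg h2]
        by_cases hl : lg.length < cur.length <;> simp [mstep, hl]
      simp only [List.foldl_cons, step]
      have ih' := ih d.toNat (mstep lg cur) [d] (by simp) (by simp)
      rw [ih']
      have hc : contRun e (d :: ds) = ([], d :: ds) := by simp [contRun, h]
      rw [hc]
      simp [runsRec]

theorem AevalRuns (L : List Char) :
    lacFinishA (L.foldl lacStepA ([], [])) = (runsRec L).foldl mstep [] := by
  cases L with
  | nil => simp [lacFinishA, runsRec]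
  | cons c cs =>
    have step : lacStepA ([], []) c = ([], [c]) := by simp [lacStepA]
    simp only [List.foldl_cons, step]
    rw [keyA cs c.toNat [] [c] (by simp) (by simp)]
    simp [runsRec]

-- ---- B-side ----
-- B's loop body, per run (candidate = the run's start and full length)
def updRun (st : Option Char × Nat) (r : List Char) : Option Char × Nat :=
  match r with
  | [] => st
  | c :: _ => if lacBetter st c r.length then (some c, r.length) else st

theorem char_toNat_inj {a b : Char} (h : a.toNat = b.toNat) : a = b := by
  rw [← Char.ofNat_toNat a, ← Char.ofNat_toNat b, h]

theorem upd_comm (a b : Char) (la lb : Nat) (hlen : a = b → la = lb) (st : Option Char × Nat) :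
    (if lacBetter (if lacBetter st a la then (some a, la) else st) b lb then (some b, lb)
      else (if lacBetter st a la then (some a, la) else st))
    = (if lacBetter (if lacBetter st b lb then (some b, lb) else st) a la then (some a, la)
      else (if lacBetter st b lb then (some b, lb) else st)) := by
  by_cases hab : a = b
  · subst hab
    rw [hlen rfl]
  · have hne : a.toNat ≠ b.toNat := fun h => hab (char_toNat_inj h)
    rcases st with ⟨be, bl⟩
    cases be with
    | none =>
      simp only [lacBetter]
      split_ifs <;>
        first
          | rfl
          | (exfalso
             simp only [Bool.or_eq_true, Bool.and_eq_true, decide_eq_true_eq, Bool.false_eq_true,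
               and_false, or_false] at *
             omega)
    | some h0 =>
      simp only [lacBetter]
      split_ifs <;>
        first
          | rfl
          | (exfalso
             simp only [Bool.or_eq_true, Bool.and_eq_true, decide_eq_true_eq, Bool.false_eq_true,
               and_false, or_false] at *
             omega)

-- B's update commutes: the fold is an argmax over (length, smallest start)
theorem lacPick_comm (S : List Char) (a b : Char) (st : Option Char × Nat) :
    lacPick S (lacPick S st a) b = lacPick S (lacPick S st b) a := by
  by_cases ha : lacMemCode S (a.toNat - 1) = true
  · have skipa : ∀ t, lacPick S t a = t := fun t => by simp [lacPick, ha]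
    rw [skipa, skipa]
  · by_cases hb : lacMemCode S (b.toNat - 1) = true
    · have skipb : ∀ t, lacPick S t b = t := fun t => by simp [lacPick, hb]
      rw [skipb, skipb]
    · simp only [lacPick, ha, hb, Bool.false_eq_true, if_false]
      exact upd_comm a b _ _ (fun h => by rw [h]) st

theorem expand_spec (chars : List Char) (base : Nat) : ∀ (k fuel len : Nat), k ≤ fuel →
    (∀ j, len ≤ j → j < len + k → lacMemCode chars (base + j) = true) →
    lacMemCode chars (base + (len + k)) = false →
    lacExpand chars base fuel len = len + k := by
  intro k
  induction k with
  | zero =>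
    intro fuel len _ _ hstop
    cases fuel with
    | zero => simp [lacExpand]
    | succ f => simpa [lacExpand] using fun hmem => absurd hmem (by simpa using hstop)
  | succ k ih =>
    intro fuel len hfuel hmem hstop
    cases fuel with
    | zero => omega
    | succ f =>
      have h1 : lacMemCode chars (base + len) = true := hmem len le_rfl (by omega)
      have h2 := ih f (len + 1) (by omega)
        (fun j hj1 hj2 => hmem j (by omega) (by omega))
        (by have : len + 1 + k = len + (k + 1) := by omega
            rw [this]; exact hstop)
      simp only [lacExpand, h1, if_true]
      rw [h2]
      omega

theorem foldl_skip (S : List Char) : ∀ (r : List Char) (st : Option Char × Nat),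
    (∀ d ∈ r, lacMemCode S (d.toNat - 1) = true) → r.foldl (lacPick S) st = st := by
  intro r
  induction r with
  | nil => intro st _; rfl
  | cons d t ih =>
    intro st hskip
    have h1 : lacPick S st d = st := by
      simp [lacPick, hskip d (by simp)]
    simp only [List.foldl_cons, h1]
    exact ih st (fun x hx => hskip x (by simp [hx]))

-- B's fold over a strictly increasing list = run-candidate updates
theorem keyB (S : List Char) : ∀ (N : Nat) (M : List Char), M.length ≤ N →
    M.Pairwise (fun a b => a.toNat < b.toNat) →
    (∀ d ∈ M, lacMemCode S d.toNat = true) →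
    (∀ n, lacMemCode S n = true → (n ∈ M.map Char.toNat) ∨ (∀ d ∈ M, n + 2 ≤ d.toNat)) →
    (∀ d ∈ M, 1 ≤ d.toNat) →
    M.length ≤ S.length →
    ∀ st, M.foldl (lacPick S) st = (runsRec M).foldl updRun st := by
  intro N
  induction N with
  | zero =>
    intro M hN _ _ _ _ _ st
    have : M = [] := List.eq_nil_iff_length_eq_zero.mpr (by omega)
    subst this; simp [runsRec]
  | succ N ihN =>
    intro M hN hp hmemI hmemE hlo hlen st
    cases M with
    | nil => simp [runsRec]
    | cons c cs =>
      rcases List.pairwise_cons.mp hp with ⟨hhd, htl⟩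
      have hsplit : (contRun c.toNat cs).1 ++ (contRun c.toNat cs).2 = cs := contRun_append cs c.toNat
      have hcodes := contRun_codes cs c.toNat
      have hgap := contRun_rest_gt cs c.toNat htl hhd
      set r := (contRun c.toNat cs).1 with hr
      set rest := (contRun c.toNat cs).2 with hrest
      have hc1 : 1 ≤ c.toNat := hlo c (by simp)
      have hrlen : r.length + rest.length = cs.length := by
        rw [← hsplit]; simp
      have hpred : lacMemCode S (c.toNat - 1) = false := by
        rcases Bool.eq_false_or_eq_true (lacMemCode S (c.toNat - 1)) with h | h
        · exfalso
          rcases hmemE _ h with hin | hall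
          · simp only [List.map_cons, List.mem_cons] at hin
            rcases hin with h1 | h1
            · omega
            · rcases List.mem_map.mp h1 with ⟨d, hd, hdc⟩
              have := hhd d hd
              omega
          · have := hall c (by simp)
            omega
        · exact h
      have hsubr : ∀ d ∈ r, d ∈ c :: cs := by
        intro d hd
        have : d ∈ cs := by rw [← hsplit]; exact List.mem_append.mpr (Or.inl hd)
        simp [this]
      have hmemr : ∀ j, 1 ≤ j → j < 1 + r.length → lacMemCode S (c.toNat + j) = true := by
        intro j hj1 hj2
        have hm : c.toNat + j ∈ List.range' (c.toNat + 1) r.length := by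
          rw [List.mem_range'_1]; omega
        rw [← hcodes] at hm
        rcases List.mem_map.mp hm with ⟨d, hdr, hdc⟩
        rw [← hdc]
        exact hmemI d (hsubr d hdr)
      have hstop : lacMemCode S (c.toNat + (1 + r.length)) = false := by
        rcases Bool.eq_false_or_eq_true (lacMemCode S (c.toNat + (1 + r.length))) with h | h
        · exfalso
          rcases hmemE _ h with hin | hall
          · simp only [List.map_cons, List.mem_cons] at hin
            rcases hin with h1 | h1
            · omega
            · rcases List.mem_map.mp h1 with ⟨d, hd, hdc⟩
              rw [← hsplit] at hd
              rcases List.mem_append.mp hd with h2 | h2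
              · have : d.toNat ∈ List.range' (c.toNat + 1) r.length := by
                  rw [← hcodes]; exact List.mem_map_of_mem h2
                rw [List.mem_range'_1] at this
                omega
              · have := hgap d h2
                omega
          · have := hall c (by simp)
            omega
        · exact h
      have hexp : lacExpand S c.toNat S.length 1 = 1 + r.length := by
        refine expand_spec S c.toNat r.length S.length 1 (by simp at hlen; omega)
          (fun j hj1 hj2 => hmemr j hj1 (by omega)) hstop
      have hstep : lacPick S st c = updRun st (c :: r) := by
        simp only [lacPick, hpred, Bool.false_eq_true, if_false, hexp, updRun, List.length_cons]
        have h1 : 1 + r.length = r.length + 1 := by omega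
        rw [h1]
      have hskip : ∀ d ∈ r, lacMemCode S (d.toNat - 1) = true := by
        intro d hdr
        have hdm : d.toNat ∈ List.range' (c.toNat + 1) r.length := by
          rw [← hcodes]; exact List.mem_map_of_mem hdr
        rw [List.mem_range'_1] at hdm
        by_cases hd1 : d.toNat - 1 = c.toNat
        · rw [hd1]; exact hmemI c (by simp)
        · have hm : d.toNat - 1 ∈ List.range' (c.toNat + 1) r.length := by
            rw [List.mem_range'_1]; omega
          rw [← hcodes] at hm
          rcases List.mem_map.mp hm with ⟨d', hd'r, hd'c⟩
          rw [← hd'c]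
          exact hmemI d' (hsubr d' hd'r)
      have hfold : (c :: cs).foldl (lacPick S) st = rest.foldl (lacPick S) (updRun st (c :: r)) := by
        rw [List.foldl_cons, hstep, ← hsplit, List.foldl_append, foldl_skip S r _ hskip]
      have hsub2 : List.Sublist rest cs := hsplit ▸ List.sublist_append_right r rest
      have hrec := ihN rest (by simp at hN; omega) (htl.sublist hsub2)
        (fun d hd => hmemI d (by simp [hsub2.mem hd]))
        (by
          intro n hn
          rcases hmemE n hn with hin | hall
          · simp only [List.map_cons, List.mem_cons] at hin
            rcases hin with h1 | h1
            · right; intro d hd; have := hgap d hd; omega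
            · rcases List.mem_map.mp h1 with ⟨d, hd, hdc⟩
              rw [← hsplit] at hd
              rcases List.mem_append.mp hd with h2 | h2
              · right; intro x hx
                have hb : d.toNat ∈ List.range' (c.toNat + 1) r.length := by
                  rw [← hcodes]; exact List.mem_map_of_mem h2
                rw [List.mem_range'_1] at hb
                have := hgap x hx
                omega
              · left; rw [← hdc]; exact List.mem_map_of_mem h2
          · right; intro d hd; exact hall d (by simp [hsub2.mem hd]))
        (fun d hd => hlo d (by simp [hsub2.mem hd]))
        (by simp at hlen; omega)
        (updRun st (c :: r))
      rw [hfold, hrec]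
      conv_rhs => rw [runsRec]
      rw [List.foldl_cons]

-- structure of the run decomposition
theorem runsRec_struct : ∀ (N : Nat) (M : List Char), M.length ≤ N →
    M.Pairwise (fun a b => a.toNat < b.toNat) →
    (∀ r ∈ runsRec M, ∃ c t, r = c :: t ∧ r.map Char.toNat = List.range' c.toNat r.length) ∧
    ((runsRec M).map (fun r => (r.headD 'a').toNat)).Pairwise (· < ·) ∧
    (∀ r ∈ runsRec M, ∀ d ∈ r, d ∈ M) := by
  intro N
  induction N with
  | zero =>
    intro M hN _
    have : M = [] := List.eq_nil_iff_length_eq_zero.mpr (by omega)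
    subst this; simp [runsRec]
  | succ N ihN =>
    intro M hN hp
    cases M with
    | nil => simp [runsRec]
    | cons c cs =>
      rcases List.pairwise_cons.mp hp with ⟨hhd, htl⟩
      have hsplit : (contRun c.toNat cs).1 ++ (contRun c.toNat cs).2 = cs := contRun_append cs c.toNat
      have hcodes := contRun_codes cs c.toNat
      have hgap := contRun_rest_gt cs c.toNat htl hhd
      set r := (contRun c.toNat cs).1 with hr
      set rest := (contRun c.toNat cs).2 with hrest
      have hsub2 : List.Sublist rest cs := hsplit ▸ List.sublist_append_right r rest
      have hrlen : r.length + rest.length = cs.length := by rw [← hsplit]; simp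
      rcases ihN rest (by simp at hN; omega) (htl.sublist hsub2) with ⟨ih1, ih2, ih3⟩
      have hrun : runsRec (c :: cs) = (c :: r) :: runsRec rest := by rw [runsRec]
      refine ⟨?_, ?_, ?_⟩
      · intro q hq
        rw [hrun] at hq
        rcases List.mem_cons.mp hq with rfl | hq
        · refine ⟨c, r, rfl, ?_⟩
          simp only [List.map_cons, List.length_cons, hcodes, List.range'_succ]
        · exact ih1 q hq
      · rw [hrun]
        simp only [List.map_cons]
        rw [List.pairwise_cons]
        refine ⟨?_, ih2⟩
        intro m hm
        rcases List.mem_map.mp hm with ⟨q, hq, hqc⟩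
        rcases ih1 q hq with ⟨c', t', rfl, _⟩
        have hmem : c' ∈ rest := ih3 _ hq c' (by simp)
        have := hgap c' hmem
        simp only [List.headD_cons] at hqc ⊢
        omega
      · intro q hq d hd
        rw [hrun] at hq
        rcases List.mem_cons.mp hq with rfl | hq
        · rcases List.mem_cons.mp hd with rfl | hd
          · simp
          · have : d ∈ cs := by rw [← hsplit]; exact List.mem_append.mpr (Or.inl hd)
            simp [this]
        · have : d ∈ cs := hsub2.mem (ih3 q hq d hd)
          simp [this]

-- B's final reconstruction
def recon : Option Char × Nat → List String
  | (none, _) => []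
  | (some h, k) => (List.range k).map (fun i => String.ofList [Char.ofNat (h.toNat + i)])

theorem list_eq_of_codes : ∀ (m : List Char) (a k : Nat),
    m.map Char.toNat = List.range' a k →
    m = (List.range k).map (fun i => Char.ofNat (a + i)) := by
  intro m
  induction m with
  | nil =>
    intro a k h
    have : k = 0 := List.range'_eq_nil_iff.mp h.symm
    subst this; simp
  | cons d t ih =>
    intro a k h
    cases k with
    | zero => simp at h
    | succ n =>
      rw [List.range'_succ] at h
      simp only [List.map_cons, List.cons.injEq] at h
      rcases h with ⟨h1, h2⟩
      have hd : Char.ofNat (a + 0) = d := by rw [Nat.add_zero, ← h1, Char.ofNat_toNat]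
      have ht := ih (a + 1) n h2
      rw [List.range_succ_eq_map, List.map_cons, hd, List.map_map, ht]
      have hfun : ((fun i => Char.ofNat (a + i)) ∘ Nat.succ) = (fun i => Char.ofNat (a + 1 + i)) := by
        funext i; simp only [Function.comp]; congr 1; omega
      rw [hfun]

theorem finalLemma : ∀ (rs : List (List Char)) (m : List Char) (st : Option Char × Nat),
    (∀ r ∈ rs, ∃ c t, r = c :: t ∧ r.map Char.toNat = List.range' c.toNat r.length) →
    ((rs.map (fun r => (r.headD 'a').toNat)).Pairwise (· < ·)) →
    ((m = [] ∧ st = (none, 0)) ∨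
      (∃ h, st = (some h, m.length) ∧
        m.map Char.toNat = List.range' h.toNat m.length ∧ m ≠ [] ∧
        (∀ r ∈ rs, h.toNat < (r.headD 'a').toNat))) →
    recon (rs.foldl updRun st) = (rs.foldl mstep m).map (fun c => String.ofList [c]) := by
  intro rs
  induction rs with
  | nil =>
    intro m st _ _ hinv
    rcases hinv with ⟨rfl, rfl⟩ | ⟨h, rfl, hcodes, _, _⟩
    · rfl
    · simp only [List.foldl_nil, recon]
      rw [list_eq_of_codes m h.toNat m.length hcodes, List.map_map]
      simp [Function.comp]
  | cons q rs ih =>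
    intro m st hrs hpw hinv
    rcases hrs q (by simp) with ⟨c, t, rfl, hqcodes⟩
    have hrs' : ∀ r ∈ rs, ∃ c t, r = c :: t ∧ r.map Char.toNat = List.range' c.toNat r.length :=
      fun r hr => hrs r (by simp [hr])
    rw [List.map_cons, List.pairwise_cons] at hpw
    rcases hpw with ⟨hhd, hpw'⟩
    simp only [List.foldl_cons]
    rcases hinv with ⟨rfl, rfl⟩ | ⟨h, rfl, hcodes, hmne, hlt⟩
    · have hb : lacBetter (none, 0) c (c :: t).length = true := by
        simp [lacBetter]
      have hup : updRun (none, 0) (c :: t) = (some c, (c :: t).length) := by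
        simp only [updRun, hb, if_true]
      have hms : mstep [] (c :: t) = c :: t := by simp [mstep]
      rw [hup, hms]
      refine ih (c :: t) _ hrs' hpw' (Or.inr ⟨c, rfl, hqcodes, by simp, ?_⟩)
      intro r hr
      rcases hrs' r hr with ⟨c', t', rfl, _⟩
      have := hhd ((c' :: t').headD 'a').toNat (List.mem_map_of_mem hr)
      simpa using this
    · have hcmp : lacBetter (some h, m.length) c (c :: t).length = (decide (m.length < (c :: t).length)) := by
        have hch : h.toNat ≠ c.toNat ∧ ¬ (c.toNat < h.toNat) := by
          have := hlt (c :: t) (by simp)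
          simp only [List.headD_cons] at this
          omega
        simp only [lacBetter]
        rcases hch with ⟨_, h2⟩
        by_cases he : (c :: t).length = m.length <;> simp [he, h2]
      by_cases hlen : m.length < (c :: t).length
      · have hup : updRun (some h, m.length) (c :: t) = (some c, (c :: t).length) := by
          simp only [updRun, hcmp]
          have hlen' : m.length < t.length + 1 := by simpa using hlen
          simp [hlen']
        have hms : mstep m (c :: t) = c :: t := by unfold mstep; rw [if_pos hlen]
        rw [hup, hms]
        refine ih (c :: t) _ hrs' hpw' (Or.inr ⟨c, rfl, hqcodes, by simp, ?_⟩)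
        intro r hr
        rcases hrs' r hr with ⟨c', t', rfl, _⟩
        have := hhd ((c' :: t').headD 'a').toNat (List.mem_map_of_mem hr)
        simpa using this
      · have hup : updRun (some h, m.length) (c :: t) = (some h, m.length) := by
          simp only [updRun, hcmp]
          have hlen' : ¬ m.length < t.length + 1 := by simpa using hlen
          simp [hlen']
        have hms : mstep m (c :: t) = m := by unfold mstep; rw [if_neg hlen]
        rw [hup, hms]
        exact ih m _ hrs' hpw' (Or.inr ⟨h, rfl, hcodes, hmne, fun r hr => hlt r (by simp [hr])⟩)

-- ===== VERDICT (by name: the statement is the Claim_ definition above) =====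
theorem longest_alphabet_chain_in_word_spec : Claim_equal_longest_alphabet_chain_in_word := by
  intro s hdom
  unfold Spec_longest_alphabet_chain_in_word
  unfold longest_alphabet_chain_in_word longest_alphabet_chain_in_word_alt
  have hrecon : ∀ st : Option Char × Nat,
      (match st.1 with
        | none => ([] : List String)
        | some h => (List.range st.2).map (fun i => String.ofList [Char.ofNat (h.toNat + i)])) = recon st := by
    rintro ⟨be, k⟩; cases be <;> rfl
  rw [hrecon]
  set S := PySem.Set.ofList s.toList with hS
  set L := PySem.List.sorted S (fun c => c) false with hL
  have hperm : L.Perm S := PySem.List.sorted_perm _ _ _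
  have hfold : S.foldl (lacPick S) (none, 0) = L.foldl (lacPick S) (none, 0) :=
    (hperm.foldl_eq' (fun x _ y _ z => lacPick_comm S x y z) (none, 0)).symm
  have hpwChar : L.Pairwise (· < ·) := PySem.List.sorted_ofList_pairwise_lt s.toList
  have hpwNat : L.Pairwise (fun a b => a.toNat < b.toNat) :=
    hpwChar.imp (fun h => Nat.lt_of_succ_le h)
  have hdomL : ∀ d ∈ L, pvDomChar d = true := by
    intro d hd
    have hdS : d ∈ S := hperm.mem_iff.mp hd
    have : d ∈ s.toList := (PySem.Set.mem_ofList s.toList d).mp hdS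
    exact List.all_eq_true.mp hdom d this
  have hlo : ∀ d ∈ L, 1 ≤ d.toNat := by
    intro d hd
    have := hdomL d hd
    simp only [pvDomChar, Bool.or_eq_true, Bool.and_eq_true, decide_eq_true_eq, beq_iff_eq] at this
    omega
  have hmemI : ∀ d ∈ L, lacMemCode S d.toNat = true := by
    intro d hd
    exact List.any_eq_true.mpr ⟨d, hperm.mem_iff.mp hd, by simp⟩
  have hmemE : ∀ n, lacMemCode S n = true →
      (n ∈ L.map Char.toNat) ∨ (∀ d ∈ L, n + 2 ≤ d.toNat) := by
    intro n hn
    rcases List.any_eq_true.mp hn with ⟨x, hx, hdec⟩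
    left
    have hxL : x ∈ L := hperm.mem_iff.mpr hx
    have : x.toNat = n := by simpa using hdec
    rw [← this]
    exact List.mem_map_of_mem hxL
  have hlen : L.length ≤ S.length := le_of_eq hperm.length_eq
  rw [hfold, keyB S L.length L le_rfl hpwNat hmemI hmemE hlo hlen (none, 0)]
  rw [AevalRuns L]
  rcases runsRec_struct L.length L le_rfl hpwNat with ⟨h1, h2, _⟩
  exact (finalLemma (runsRec L) [] (none, 0) h1 h2 (Or.inl ⟨rfl, rfl⟩)).symm
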